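-- pv_equiv track=rewrite | github.com/paulchrisluke/python-analyzer | etl_pipeline/utils/equipment_calculator.py | _categorize_equipment
-- ===== SOURCE A (Python) =====
-- def _categorize_equipment(description: str) -> str:
--     """
--     Categorize equipment based on description.
--
--     Args:
--         description: Equipment description
--
--     Returns:
--         Category name
--     """
--     description_lower = description.lower()
--
--     if any(keyword in description_lower for keyword in ['audiometer', 'cello']):
--         return 'Audiometer'
--     elif any(keyword in description_lower for keyword in ['rem', 'trumpet']):
--         return 'REM System'
--     elif any(keyword in description_lower for keyword in ['room', 'booth', 'wall']):
--         return 'Test Booth'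
--     elif any(keyword in description_lower for keyword in ['install', 'installation']):
--         return 'Installation'
--     elif any(keyword in description_lower for keyword in ['freight', 'shipping']):
--         return 'Freight'
--     elif any(keyword in description_lower for keyword in ['cable', 'earphone', 'accessory']):
--         return 'Accessory'
--     else:
--         return 'Other'
-- ===== SOURCE B (Python) =====
-- _KEYWORD_RANK = {
--     'audiometer': 0, 'cello': 0,
--     'rem': 1, 'trumpet': 1,
--     'room': 2, 'booth': 2, 'wall': 2,
--     'install': 3, 'installation': 3,
--     'freight': 4, 'shipping': 4,
--     'cable': 5, 'earphone': 5, 'accessory': 5,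
-- }
-- _LENGTHS = (3, 4, 5, 7, 8, 9, 10, 12)
-- _CATEGORIES = ['Audiometer', 'REM System', 'Test Booth',
--                'Installation', 'Freight', 'Accessory']
--
--
-- def _categorize_equipment(description: str) -> str:
--     # Dictionary-based multi-pattern scan: walk the positions of the lowered
--     # string once, hash each candidate substring (one per keyword length) into
--     # the keyword->priority table, and keep the minimal priority seen.
--     s = description.lower()
--     best = 6
--     for i in range(len(s)):
--         for length in _LENGTHS:
--             rank = _KEYWORD_RANK.get(s[i:i + length])
--             if rank is not None and rank < best:
--                 best = rank
--     return _CATEGORIES[best] if best < 6 else 'Other'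
-- ===== Notes on version B (the rewrite author's own statement) =====
-- stated objective: alternative
-- what changed: Replaces A's per-keyword cascade of 14 substring searches by a dictionary-based multi-pattern scan: one pass over the positions of the lowered string, hashing each candidate substring (one per keyword length) into a keyword-to-priority table and keeping the minimal priority.
import Mathlib
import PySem

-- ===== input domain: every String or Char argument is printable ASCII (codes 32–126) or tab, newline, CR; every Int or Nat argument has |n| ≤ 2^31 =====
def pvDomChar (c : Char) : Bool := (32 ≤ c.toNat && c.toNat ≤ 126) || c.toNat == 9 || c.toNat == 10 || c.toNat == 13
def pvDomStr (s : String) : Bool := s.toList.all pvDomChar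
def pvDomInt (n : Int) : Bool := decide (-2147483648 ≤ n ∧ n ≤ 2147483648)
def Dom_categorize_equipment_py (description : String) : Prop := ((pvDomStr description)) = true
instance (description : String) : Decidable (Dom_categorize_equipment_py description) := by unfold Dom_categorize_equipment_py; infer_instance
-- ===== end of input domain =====

-- B replaces A's keyword-cascade (14 substring searches) by a dictionary-based multi-pattern scan:
-- one pass over the positions of the lowered string, hashing each candidate substring into a
-- keyword→priority table and keeping the minimal priority (objective: alternative).


-- ===== PORT A =====
def categorize_equipment_py (description : String) : String :=
  let description_lower := PySem.Str.lower description
  if ["audiometer", "cello"].any (fun keyword => PySem.Str.isIn keyword description_lower) then "Audiometer"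
  else if ["rem", "trumpet"].any (fun keyword => PySem.Str.isIn keyword description_lower) then "REM System"
  else if ["room", "booth", "wall"].any (fun keyword => PySem.Str.isIn keyword description_lower) then "Test Booth"
  else if ["install", "installation"].any (fun keyword => PySem.Str.isIn keyword description_lower) then "Installation"
  else if ["freight", "shipping"].any (fun keyword => PySem.Str.isIn keyword description_lower) then "Freight"
  else if ["cable", "earphone", "accessory"].any (fun keyword => PySem.Str.isIn keyword description_lower) then "Accessory"
  else "Other"

-- ===== PORT B =====
-- the _KEYWORD_RANK dict literal of Source B
def pvKwPairs : List (List Char × Int) :=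
  [("audiometer".toList, 0), ("cello".toList, 0),
   ("rem".toList, 1), ("trumpet".toList, 1),
   ("room".toList, 2), ("booth".toList, 2), ("wall".toList, 2),
   ("install".toList, 3), ("installation".toList, 3),
   ("freight".toList, 4), ("shipping".toList, 4),
   ("cable".toList, 5), ("earphone".toList, 5), ("accessory".toList, 5)]

def pvKwRank : PySem.Dict (List Char) Int := PySem.Dict.ofList pvKwPairs

def pvLengths : List Int := [3, 4, 5, 7, 8, 9, 10, 12]

def pvCategories : List String :=
  ["Audiometer", "REM System", "Test Booth", "Installation", "Freight", "Accessory"]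

-- the inner 'for length in _LENGTHS' loop of Source B (rank = _KEYWORD_RANK.get(s[i:i+length]))
def pvInner (s : List Char) (best : Int) (i : Int) : Int :=
  pvLengths.foldl (fun b length =>
    match pvKwRank.get? (PySem.List.slice s (some i) (some (i + length))) with
    | some rank => if rank < b then rank else b
    | none => b) best

-- the outer 'for i in range(len(s))' loop of Source B
def pvBest (s : List Char) : Int :=
  (PySem.List.pyRange 0 s.length 1).foldl (pvInner s) 6

def categorize_equipment_py_alt (description : String) : String :=
  let s := PySem.Str.lower description
  let best := pvBest s.toList
  if best < 6 then PySem.List.pyGetD pvCategories best "" else "Other"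

-- ===== PRECONDITION & SPEC =====
def Spec_categorize_equipment_py (description : String) (out : String) : Prop := out = categorize_equipment_py_alt description
instance (description : String) (out : String) : Decidable (Spec_categorize_equipment_py description out) := by unfold Spec_categorize_equipment_py; infer_instance

-- ===== CLAIM (what is proved, stated in full; the proofs are below) =====
def Claim_equal_categorize_equipment_py : Prop := ∀ (description : String), Dom_categorize_equipment_py description → Spec_categorize_equipment_py description (categorize_equipment_py description)

-- ===== LEMMAS AND PROOFS =====

-- 'some keyword of rank r occurs in s'
def pvMatched (s : List Char) (r : Int) : Prop := ∃ kw, (kw, r) ∈ pvKwPairs ∧ kw <:+: s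

-- concrete facts about the keyword table, all decidable
lemma pvKwPairs_facts : ∀ p ∈ pvKwPairs,
    p.1 ≠ [] ∧ ((p.1.length : Int) ∈ pvLengths) ∧ pvKwRank.get? p.1 = some p.2 ∧ 0 ≤ p.2 ∧ p.2 ≤ 5 := by
  decide

lemma pvKwRank_items : pvKwRank.items = pvKwPairs := by decide

lemma pvKwRank_nodup : pvKwRank.keys.Nodup := by decide

lemma pvGet_mem {key : List Char} {r : Int} (h : pvKwRank.get? key = some r) :
    (key, r) ∈ pvKwPairs := by
  have := (PySem.Dict.get?_eq_some_iff_mem_items pvKwRank key r pvKwRank_nodup).mp h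
  rwa [pvKwRank_items] at this

-- generic fold lemmas
lemma pvFoldl_le {α : Type} (g : Int → α → Int) (l : List α)
    (hg : ∀ b x, x ∈ l → g b x ≤ b) : ∀ b, l.foldl g b ≤ b := by
  induction l with
  | nil => intro b; simp
  | cons x xs ih =>
      intro b
      have h1 : g b x ≤ b := hg b x (by simp)
      have h2 := ih (fun b y hy => hg b y (by simp [hy])) (g b x)
      simpa using le_trans h2 h1

lemma pvFoldl_pres {α : Type} (Q : Int → Prop) (g : Int → α → Int) (l : List α)
    (hg : ∀ b x, x ∈ l → Q b → Q (g b x)) : ∀ b, Q b → Q (l.foldl g b) := by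
  induction l with
  | nil => intro b hb; simpa using hb
  | cons x xs ih =>
      intro b hb
      exact ih (fun b y hy => hg b y (by simp [hy])) (g b x) (hg b x (by simp) hb)

lemma pvFoldl_le_of_mem {α : Type} (g : Int → α → Int) (l : List α) (r : Int) (x : α)
    (hmono : ∀ b y, y ∈ l → g b y ≤ b) (hx : x ∈ l) (hhit : ∀ b, g b x ≤ r) :
    ∀ b, l.foldl g b ≤ r := by
  intro b
  obtain ⟨l1, l2, rfl⟩ := List.append_of_mem hx
  rw [List.foldl_append]
  simp only [List.foldl_cons]
  calc l2.foldl g (g (l1.foldl g b) x)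
      ≤ g (l1.foldl g b) x := pvFoldl_le g l2 (fun b y hy => hmono b y (by simp [hy])) _
    _ ≤ r := hhit _

lemma pvInner_step_le (s : List Char) (i : Int) : ∀ b L, (L ∈ pvLengths) →
    (match pvKwRank.get? (PySem.List.slice s (some i) (some (i + L))) with
      | some rank => if rank < b then rank else b
      | none => b) ≤ b := by
  intro b L _
  cases h : pvKwRank.get? (PySem.List.slice s (some i) (some (i + L))) with
  | none => simp
  | some r => simp only; split <;> omega

lemma pvInner_le (s : List Char) (b i : Int) : pvInner s b i ≤ b := by
  unfold pvInner
  exact pvFoldl_le _ _ (fun b L hL => pvInner_step_le s i b L hL) b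

-- soundness: the fold's value is 6 or the rank of a matched keyword
lemma pvBest_sound (s : List Char) :
    pvBest s = 6 ∨ pvMatched s (pvBest s) := by
  unfold pvBest
  apply pvFoldl_pres (fun v => v = 6 ∨ pvMatched s v)
  · intro b i hi hb
    have hi0 : 0 ≤ i := ((PySem.List.mem_pyRange_one).mp hi).1
    unfold pvInner
    apply pvFoldl_pres (fun v => v = 6 ∨ pvMatched s v)
    · intro b' L hL hb'
      cases h : pvKwRank.get? (PySem.List.slice s (some i) (some (i + L))) with
      | none => simpa using hb'
      | some r =>
          simp only
          split
          · right
            refine ⟨_, pvGet_mem h, ?_⟩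
            have hL0 : 0 ≤ L := by
              simp only [pvLengths, List.mem_cons, List.not_mem_nil, or_false] at hL
              rcases hL with h'|h'|h'|h'|h'|h'|h'|h' <;> omega
            rw [PySem.List.slice_toNat s hi0 (by omega)]
            exact ((s.drop i.toNat).take_prefix _).isInfix.trans (s.drop_suffix i.toNat).isInfix
          · exact hb'
    · exact hb
  · left; rfl

-- completeness: a matched keyword of rank r forces the fold's value ≤ r
lemma pvBest_le_of_matched {s : List Char} {r : Int} (h : pvMatched s r) : pvBest s ≤ r := by
  obtain ⟨kw, hmem, hinf⟩ := h
  obtain ⟨hne, hlen, hget, -, -⟩ := pvKwPairs_facts (kw, r) hmem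
  dsimp only at hne hlen hget
  obtain ⟨j, hpre, hjlt⟩ : ∃ j : Nat, kw <+: s.drop j ∧ j < s.length := by
    obtain ⟨t, u, heq⟩ := hinf
    refine ⟨t.length, ?_, ?_⟩
    · rw [← heq, List.append_assoc, List.drop_left]
      exact List.prefix_append kw u
    · have := List.length_pos_of_ne_nil hne
      rw [← heq]
      simp only [List.length_append]
      omega
  -- the slice B hashes at position j with length |kw| is exactly kw
  have hslice : PySem.List.slice s (some (j : Int)) (some ((j : Int) + (kw.length : Int))) = kw := by
    rw [PySem.List.slice_natCast_add]
    exact (List.prefix_iff_eq_take.mp hpre).symm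
  have hinner : ∀ b, pvInner s b (j : Int) ≤ r := by
    intro b
    unfold pvInner
    refine pvFoldl_le_of_mem _ _ r ((kw.length : Int))
      (fun b' y hy => pvInner_step_le s (j : Int) b' y hy) hlen ?_ b
    intro b'
    simp only [hslice, hget]
    split <;> omega
  unfold pvBest
  refine pvFoldl_le_of_mem (pvInner s) _ r ((j : Int))
    (fun b y _ => pvInner_le s b y) ?_ hinner 6
  rw [PySem.List.mem_pyRange_one]
  exact ⟨Int.natCast_nonneg j, by exact_mod_cast hjlt⟩

lemma pvBest_bounds (s : List Char) : 0 ≤ pvBest s ∧ pvBest s ≤ 6 := by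
  constructor
  · rcases pvBest_sound s with h | ⟨kw, hmem, -⟩
    · omega
    · have := pvKwPairs_facts _ hmem
      omega
  · exact pvFoldl_le _ _ (fun b i _ => pvInner_le s b i) 6

-- the six category conditions of A, stated as matches in B's keyword table
lemma pvM0 (s : String) :
    (["audiometer", "cello"].any (fun k => PySem.Str.isIn k s) = true) ↔ pvMatched s.toList 0 := by
  simp [pvMatched, pvKwPairs, PySem.Chars.isIn_iff_infix, Prod.ext_iff]
lemma pvM1 (s : String) :
    (["rem", "trumpet"].any (fun k => PySem.Str.isIn k s) = true) ↔ pvMatched s.toList 1 := by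
  simp [pvMatched, pvKwPairs, PySem.Chars.isIn_iff_infix, Prod.ext_iff]
lemma pvM2 (s : String) :
    (["room", "booth", "wall"].any (fun k => PySem.Str.isIn k s) = true) ↔ pvMatched s.toList 2 := by
  simp [pvMatched, pvKwPairs, PySem.Chars.isIn_iff_infix, Prod.ext_iff]
lemma pvM3 (s : String) :
    (["install", "installation"].any (fun k => PySem.Str.isIn k s) = true) ↔ pvMatched s.toList 3 := by
  simp [pvMatched, pvKwPairs, PySem.Chars.isIn_iff_infix, Prod.ext_iff]
lemma pvM4 (s : String) :
    (["freight", "shipping"].any (fun k => PySem.Str.isIn k s) = true) ↔ pvMatched s.toList 4 := by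
  simp [pvMatched, pvKwPairs, PySem.Chars.isIn_iff_infix, Prod.ext_iff]
lemma pvM5 (s : String) :
    (["cable", "earphone", "accessory"].any (fun k => PySem.Str.isIn k s) = true) ↔ pvMatched s.toList 5 := by
  simp [pvMatched, pvKwPairs, PySem.Chars.isIn_iff_infix, Prod.ext_iff]

-- matched ranks are 0..5
lemma pvMatched_rank {s : List Char} {r : Int} (h : pvMatched s r) : 0 ≤ r ∧ r ≤ 5 := by
  obtain ⟨kw, hmem, -⟩ := h
  have := pvKwPairs_facts _ hmem
  omega

lemma pvBest_val {s : List Char} {k : Int} (hk : pvMatched s k)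
    (hlt : ∀ r : Int, 0 ≤ r → r < k → ¬ pvMatched s r) : pvBest s = k := by
  have hle : pvBest s ≤ k := pvBest_le_of_matched hk
  have h0 : 0 ≤ pvBest s := (pvBest_bounds s).1
  rcases pvBest_sound s with h6 | hm
  · have := (pvMatched_rank hk).2; omega
  · by_contra hne
    exact hlt _ h0 (by omega) hm

-- ===== VERDICT (by name: the statement is the Claim_ definition above) =====
theorem categorize_equipment_py_spec : Claim_equal_categorize_equipment_py := by
  intro description _
  unfold Spec_categorize_equipment_py categorize_equipment_py categorize_equipment_py_alt
  simp only []
  set lo := PySem.Str.lower description with hlo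
  set cs := lo.toList with hcs
  by_cases h0 : pvMatched cs 0
  · rw [if_pos ((pvM0 lo).mpr h0)]
    rw [pvBest_val h0 (fun r h1 h2 _ => by omega)]
    decide
  · rw [if_neg (fun hc => h0 ((pvM0 lo).mp hc))]
    by_cases h1 : pvMatched cs 1
    · rw [if_pos ((pvM1 lo).mpr h1)]
      rw [pvBest_val h1 (fun r hr1 hr2 hm => by interval_cases r <;> tauto)]
      decide
    · rw [if_neg (fun hc => h1 ((pvM1 lo).mp hc))]
      by_cases h2 : pvMatched cs 2
      · rw [if_pos ((pvM2 lo).mpr h2)]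
        rw [pvBest_val h2 (fun r hr1 hr2 hm => by interval_cases r <;> tauto)]
        decide
      · rw [if_neg (fun hc => h2 ((pvM2 lo).mp hc))]
        by_cases h3 : pvMatched cs 3
        · rw [if_pos ((pvM3 lo).mpr h3)]
          rw [pvBest_val h3 (fun r hr1 hr2 hm => by interval_cases r <;> tauto)]
          decide
        · rw [if_neg (fun hc => h3 ((pvM3 lo).mp hc))]
          by_cases h4 : pvMatched cs 4
          · rw [if_pos ((pvM4 lo).mpr h4)]
            rw [pvBest_val h4 (fun r hr1 hr2 hm => by interval_cases r <;> tauto)]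
            decide
          · rw [if_neg (fun hc => h4 ((pvM4 lo).mp hc))]
            by_cases h5 : pvMatched cs 5
            · rw [if_pos ((pvM5 lo).mpr h5)]
              rw [pvBest_val h5 (fun r hr1 hr2 hm => by interval_cases r <;> tauto)]
              decide
            · rw [if_neg (fun hc => h5 ((pvM5 lo).mp hc))]
              have h6 : pvBest cs = 6 := by
                rcases pvBest_sound cs with h | hm
                · exact h
                · exfalso
                  obtain ⟨hr1, hr2⟩ := pvMatched_rank hm
                  generalize hg : pvBest cs = v at hm hr1 hr2
                  interval_cases v <;> tauto
              rw [h6]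
              decide
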